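-- pv_equiv track=rewrite | github.com/alekgreen/py4 | benchmarks/list_mutation.py | work
-- ===== SOURCE A (Python) =====
-- def wrap_97(value: int) -> int:
--     while value >= 97:
--         value -= 97
--     return value
--
-- def wrap_5(value: int) -> int:
--     while value >= 5:
--         value -= 5
--     return value
--
-- def work(size: int, rounds: int) -> int:
--     xs = []
--     i = 0
--     total = 0
--
--     while i < size:
--         xs.append(wrap_97(i))
--         i += 1
--
--     r = 0
--     while r < rounds:
--         j = 0
--         while j < len(xs):
--             xs[j] = xs[j] + wrap_5(j + r)
--             total += xs[j]
--             while total > 1000000: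
--                 total -= 1000000
--             j += 1
--         r += 1
--
--     return total
-- ===== SOURCE B (Python) =====
-- def work(size: int, rounds: int) -> int:
--     # One pass over indices + one pass over rounds instead of A's rounds*size
--     # simulation: total's raw sum is R*sum(j%97) + sum_t (R-t)*H(t%5), then a
--     # single final reduction into (0, 1000000] replaces A's repeated subtraction.
--     n = size if size > 0 else 0
--     r = rounds if rounds > 0 else 0
--     s97 = 0
--     h = [0, 0, 0, 0, 0]
--     for j in range(n):
--         s97 += j % 97
--         h = [h[s] + (j + s) % 5 for s in range(5)]
--     total = r * s97
--     for t in range(r):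
--         total += (r - t) * h[t % 5]
--     return total if total <= 1000000 else (total - 1) % 1000000 + 1
-- ===== Notes on version B (the rewrite author's own statement) =====
-- stated objective: faster
-- what changed: Replaces the rounds*size in-place list simulation (with repeated-subtraction wrap_97/wrap_5 helpers) by two independent linear passes: one over indices computing sum(j%97) and the five mod-5 column sums, one over rounds accumulating triangular weights (R-t)*h[t%5], with a single closed-form final reduction of the total into (0,1000000].
import Mathlib
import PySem

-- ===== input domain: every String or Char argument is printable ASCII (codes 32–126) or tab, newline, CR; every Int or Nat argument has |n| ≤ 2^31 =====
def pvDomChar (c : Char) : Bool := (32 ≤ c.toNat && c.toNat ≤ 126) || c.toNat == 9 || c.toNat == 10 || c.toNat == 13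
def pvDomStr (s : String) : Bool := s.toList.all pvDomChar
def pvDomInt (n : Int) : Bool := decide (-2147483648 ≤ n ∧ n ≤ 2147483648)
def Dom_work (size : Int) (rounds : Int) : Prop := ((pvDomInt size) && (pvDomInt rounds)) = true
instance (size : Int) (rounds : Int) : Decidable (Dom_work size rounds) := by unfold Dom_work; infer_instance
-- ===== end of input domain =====

-- B replaces A's rounds*size in-place list simulation by two linear passes
-- (index sums and triangular round weights) plus one closed-form final
-- reduction; equal return value on every input (objective: faster).

-- ===== PORT A =====
-- while value >= 97: value -= 97
def wrap97 (value : Int) : Int :=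
  if 97 ≤ value then wrap97 (value - 97) else value
termination_by value.toNat
decreasing_by omega

-- while value >= 5: value -= 5
def wrap5 (value : Int) : Int :=
  if 5 ≤ value then wrap5 (value - 5) else value
termination_by value.toNat
decreasing_by omega

-- while i < size: xs.append(wrap_97(i)); i += 1
def buildLoop (size i : Int) (xs : List Int) : List Int :=
  if i < size then buildLoop size (i + 1) (xs ++ [wrap97 i]) else xs
termination_by (size - i).toNat
decreasing_by omega

-- while total > 1000000: total -= 1000000
def reduceLoop (total : Int) : Int :=
  if 1000000 < total then reduceLoop (total - 1000000) else total
termination_by total.toNat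
decreasing_by omega

-- inner 'while j < len(xs)' loop; j is always in [0, len xs) at the accesses,
-- so xs[j] is (pyGet? xs j).getD 0 and the assignment 'xs[j] = …' is List.set at j.toNat
def innerLoop (r : Int) (xs : List Int) (total j : Int) : List Int × Int :=
  if _h : j < (xs.length : Int) then
    let v := (PySem.List.pyGet? xs j).getD 0 + wrap5 (j + r)
    let xs' := xs.set j.toNat v
    let total' := reduceLoop (total + v)
    innerLoop r xs' total' (j + 1)
  else (xs, total)
termination_by ((xs.length : Int) - j).toNat
decreasing_by simp only [List.length_set]; omega

-- outer 'while r < rounds' loop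
def outerLoop (rounds : Int) (xs : List Int) (total r : Int) : Int :=
  if r < rounds then
    let p := innerLoop r xs total 0
    outerLoop rounds p.1 p.2 (r + 1)
  else total
termination_by (rounds - r).toNat
decreasing_by omega

def work (size : Int) (rounds : Int) : Int :=
  outerLoop rounds (buildLoop size 0 []) 0 0

-- ===== PORT B =====
-- per-index step: s97 += j % 97 ; h = [h[s] + (j + s) % 5 for s in range(5)]  (h[s]: s ∈ [0,5), in range)
def jstep (st : Int × List Int) (j : Int) : Int × List Int :=
  (st.1 + j % 97,
   (PySem.List.pyRange 0 5 1).map (fun s => (PySem.List.pyGet? st.2 s).getD 0 + (j + s) % 5))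

def work_alt (size : Int) (rounds : Int) : Int :=
  let n : Int := if 0 < size then size else 0
  let r : Int := if 0 < rounds then rounds else 0
  let st := (PySem.List.pyRange 0 n 1).foldl jstep (0, [0, 0, 0, 0, 0])
  -- t % 5 ∈ [0,5), so h[t % 5] is in range
  let total := (PySem.List.pyRange 0 r 1).foldl
      (fun tot t => tot + (r - t) * (PySem.List.pyGet? st.2 (t % 5)).getD 0) (r * st.1)
  if total ≤ 1000000 then total else (total - 1) % 1000000 + 1

-- ===== PRECONDITION & SPEC =====
def Spec_work (size : Int) (rounds : Int) (out : Int) : Prop := out = work_alt size rounds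
instance (size : Int) (rounds : Int) (out : Int) : Decidable (Spec_work size rounds out) := by unfold Spec_work; infer_instance

-- ===== CLAIM (what is proved, stated in full; the proofs are below) =====
def Claim_equal_work : Prop := ∀ (size : Int) (rounds : Int), Dom_work size rounds → Spec_work size rounds (work size rounds)

-- ===== LEMMAS AND PROOFS =====

-- the value 'total' holds once the reduce loop has run: ≤ 1000000, ≡ raw sum mod 1000000
def canon (x : Int) : Int := if x ≤ 1000000 then x else (x - 1) % 1000000 + 1

-- mathematical descriptions of the loop states
def S97sum (N : Nat) : Int := ∑ j ∈ Finset.range N, (j : Int) % 97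
def Hrow (s : Int) (N : Nat) : Int := ∑ j ∈ Finset.range N, ((j : Int) + s) % 5
def XsL (N m : Nat) : List Int :=
  (List.range N).map (fun j : Nat => (j : Int) % 97 + ∑ t ∈ Finset.range m, ((j : Int) + (t : Int)) % 5)
def Psum (N R : Nat) : Int := ∑ r ∈ Finset.range R, (XsL N (r + 1)).sum

theorem wrap97_eq (v : Int) (h : 0 ≤ v) : wrap97 v = v % 97 := by
  rw [wrap97]
  split
  · rw [wrap97_eq (v - 97) (by omega)]; omega
  · omega
termination_by v.toNat
decreasing_by omega

theorem wrap5_eq (v : Int) (h : 0 ≤ v) : wrap5 v = v % 5 := by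
  rw [wrap5]
  split
  · rw [wrap5_eq (v - 5) (by omega)]; omega
  · omega
termination_by v.toNat
decreasing_by omega

theorem reduceLoop_eq (x : Int) : reduceLoop x = canon x := by
  rw [reduceLoop]
  split
  · rw [reduceLoop_eq (x - 1000000)]; unfold canon; split_ifs <;> omega
  · unfold canon; split_ifs <;> omega
termination_by x.toNat
decreasing_by omega

theorem canon_add (x a : Int) (ha : 0 ≤ a) :
    canon (canon x + a) = canon (x + a) := by
  unfold canon; split_ifs <;> omega

theorem foldl_red (l : List Int) (x : Int) (hx : 0 ≤ x) (hl : ∀ a ∈ l, 0 ≤ a) :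
    l.foldl (fun t a => reduceLoop (t + a)) (canon x) = canon (x + l.sum) := by
  induction l generalizing x with
  | nil => simp
  | cons a tl ih =>
    have ha : 0 ≤ a := hl a (by simp)
    simp only [List.foldl_cons, List.sum_cons]
    rw [reduceLoop_eq, canon_add x a ha,
      ih (x + a) (by omega) (fun b hb => hl b (by simp [hb])), add_assoc]

theorem buildLoop_eq (n : Nat) : ∀ (size i : Int) (xs : List Int), (size - i).toNat = n →
    buildLoop size i xs = xs ++ (List.range n).map (fun k : Nat => wrap97 (i + (k : Int))) := by
  induction n with
  | zero =>
    intro size i xs h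
    rw [buildLoop]
    have : ¬ i < size := by omega
    simp [this]
  | succ n ih =>
    intro size i xs h
    have hlt : i < size := by omega
    rw [buildLoop, if_pos hlt, ih size (i + 1) _ (by omega)]
    rw [List.range_succ_eq_map, List.map_cons, List.map_map]
    have h2 : List.map ((fun k : Nat => wrap97 (i + (k : Int))) ∘ Nat.succ) (List.range n)
        = List.map (fun k : Nat => wrap97 (i + 1 + (k : Int))) (List.range n) := by
      apply List.map_congr_left
      intro a _
      simp only [Function.comp_apply]
      congr 1
      push_cast
      ring
    rw [h2]
    simp

-- proof-side mirror of the inner loop, acting on the unprocessed suffix of xs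
def go (r b : Int) (l : List Int) (total : Int) : List Int × Int :=
  match l with
  | [] => ([], total)
  | x :: tl =>
    let v := x + wrap5 (b + r)
    let p := go r (b + 1) tl (reduceLoop (total + v))
    (v :: p.1, p.2)

theorem innerLoop_go (r : Int) : ∀ (n : Nat) (xs : List Int) (total j : Int),
    0 ≤ j → (xs.length - j.toNat) = n →
    innerLoop r xs total j =
      ((xs.take j.toNat) ++ (go r j (xs.drop j.toNat) total).1,
       (go r j (xs.drop j.toNat) total).2) := by
  intro n
  induction n with
  | zero =>
    intro xs total j hj hn
    rw [innerLoop]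
    have hge : ¬ j < (xs.length : Int) := by omega
    rw [dif_neg hge]
    rw [List.drop_eq_nil_of_le (by omega), List.take_of_length_le (by omega)]
    simp [go]
  | succ n ih =>
    intro xs total j hj hn
    have hlt : j < (xs.length : Int) := by omega
    have hjn : j.toNat < xs.length := by omega
    rw [innerLoop, dif_pos hlt]
    have hget : (PySem.List.pyGet? xs j).getD 0 = xs[j.toNat] := by
      rw [PySem.List.pyGet?_of_nonneg xs hj, List.getElem?_eq_getElem hjn]; rfl
    set v := (PySem.List.pyGet? xs j).getD 0 + wrap5 (j + r) with hv
    rw [ih (xs.set j.toNat v) (reduceLoop (total + v)) (j + 1) (by omega) (by simp; omega)]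
    have hdrop : xs.drop j.toNat = xs[j.toNat] :: xs.drop (j.toNat + 1) :=
      (List.getElem_cons_drop hjn).symm
    have hset : xs.set j.toNat v = xs.take j.toNat ++ v :: xs.drop (j.toNat + 1) :=
      List.set_eq_take_cons_drop v hjn
    have hj1 : (j + 1).toNat = j.toNat + 1 := by omega
    rw [hj1, hset]
    have hl : (xs.take j.toNat).length = j.toNat := by simp; omega
    have htk : (xs.take j.toNat ++ v :: xs.drop (j.toNat + 1)).take (j.toNat + 1)
        = xs.take j.toNat ++ [v] := by
      rw [List.take_append, List.take_of_length_le (by omega), hl, Nat.add_sub_cancel_left]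
      simp
    have hdr : (xs.take j.toNat ++ v :: xs.drop (j.toNat + 1)).drop (j.toNat + 1)
        = xs.drop (j.toNat + 1) := by
      rw [List.drop_append, List.drop_of_length_le (by omega), hl, Nat.add_sub_cancel_left]
      simp
    rw [htk, hdr]
    conv_rhs => rw [hdrop]
    rw [go]
    simp only [hget, hv]
    simp [List.append_assoc]

theorem go_spec (r : Int) : ∀ (l : List Int) (b total : Int),
    go r b l total =
      (l.mapIdx (fun k x => x + wrap5 (b + (k : Int) + r)),
       (l.mapIdx (fun k x => x + wrap5 (b + (k : Int) + r))).foldl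
         (fun t a => reduceLoop (t + a)) total) := by
  intro l
  induction l with
  | nil => intro b total; simp [go]
  | cons x tl ih =>
    intro b total
    rw [go]
    simp only [List.mapIdx_cons, List.foldl_cons]
    have hf : (fun (k : Nat) (y : Int) => y + wrap5 (b + ((k : Int) + 1) + r))
        = (fun (k : Nat) (y : Int) => y + wrap5 ((b + 1) + (k : Int) + r)) := by
      funext k y; congr 1; ring_nf
    simp only [Nat.cast_zero, add_zero, Nat.cast_add, Nat.cast_one]
    rw [ih (b + 1) (reduceLoop (total + (x + wrap5 (b + r))))]
    simp [hf]

theorem XsL_step (N m : Nat) :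
    (XsL N m).mapIdx (fun k x => x + wrap5 ((0 : Int) + (k : Int) + (m : Int))) = XsL N (m + 1) := by
  apply List.ext_getElem
  · simp [XsL]
  · intro j h1 h2
    simp only [XsL, List.getElem_mapIdx, List.getElem_map, List.getElem_range]
    rw [wrap5_eq _ (by positivity), Finset.sum_range_succ]
    ring_nf

theorem XsL_nonneg (N m : Nat) : ∀ a ∈ XsL N m, 0 ≤ a := by
  intro a ha
  simp only [XsL, List.mem_map, List.mem_range] at ha
  obtain ⟨j, _, rfl⟩ := ha
  have h1 : (0 : Int) ≤ (j : Int) % 97 := Int.emod_nonneg _ (by norm_num)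
  have h2 : (0 : Int) ≤ ∑ t ∈ Finset.range m, ((j : Int) + (t : Int)) % 5 :=
    Finset.sum_nonneg (fun t _ => Int.emod_nonneg _ (by norm_num))
  omega

theorem Psum_nonneg (N m : Nat) : 0 ≤ Psum N m :=
  Finset.sum_nonneg (fun r _ => List.sum_nonneg (XsL_nonneg N (r + 1)))

theorem outer_spec (rounds : Int) (N : Nat) : ∀ (n m : Nat), rounds.toNat = m + n →
    outerLoop rounds (XsL N m) (canon (Psum N m)) (m : Int) = canon (Psum N rounds.toNat) := by
  intro n
  induction n with
  | zero =>
    intro m h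
    rw [outerLoop]
    have hge : ¬ ((m : Int) < rounds) := by omega
    rw [if_neg hge, h]
    norm_num
  | succ n ih =>
    intro m h
    have hlt : (m : Int) < rounds := by omega
    rw [outerLoop, if_pos hlt]
    have hinner := innerLoop_go (m : Int) ((XsL N m).length) (XsL N m) (canon (Psum N m)) 0
      le_rfl (by simp)
    simp only [Int.toNat_zero, List.take_zero, List.drop_zero, List.nil_append] at hinner
    rw [hinner, go_spec]
    simp only [zero_add]
    have hXs : (XsL N m).mapIdx (fun k x => x + wrap5 ((0 : Int) + (k : Int) + (m : Int)))
        = XsL N (m + 1) := XsL_step N m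
    simp only [zero_add] at hXs
    rw [hXs, foldl_red _ _ (Psum_nonneg N m) (XsL_nonneg N (m + 1))]
    have hP : Psum N m + (XsL N (m + 1)).sum = Psum N (m + 1) := (Finset.sum_range_succ _ m).symm
    rw [hP]
    have hcast : (m : Int) + 1 = ((m + 1 : Nat) : Int) := by push_cast; ring
    rw [hcast]
    exact ih (m + 1) (by omega)

theorem work_eq_canon (size rounds : Int) :
    work size rounds = canon (Psum size.toNat rounds.toNat) := by
  unfold work
  rw [buildLoop_eq size.toNat size 0 [] (by omega)]
  have hxs : (List.range size.toNat).map (fun k : Nat => wrap97 (0 + (k : Int)))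
      = XsL size.toNat 0 := by
    apply List.map_congr_left
    intro j _
    rw [zero_add, wrap97_eq _ (by positivity)]
    simp
  have h0 : (0 : Int) = canon (Psum size.toNat 0) := by simp [Psum, canon]
  rw [List.nil_append, hxs]
  calc outerLoop rounds (XsL size.toNat 0) 0 0
      = outerLoop rounds (XsL size.toNat 0) (canon (Psum size.toNat 0)) ((0 : Nat) : Int) := by
        rw [← h0]; norm_num
    _ = canon (Psum size.toNat rounds.toNat) := outer_spec rounds size.toNat rounds.toNat 0 (by omega)

-- ===== B side =====

theorem bstate (n : Nat) :
    ((List.range n).map (fun k : Nat => (k : Int))).foldl jstep (0, [0, 0, 0, 0, 0])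
      = (S97sum n, [Hrow 0 n, Hrow 1 n, Hrow 2 n, Hrow 3 n, Hrow 4 n]) := by
  induction n with
  | zero => simp [S97sum, Hrow]
  | succ n ih =>
    rw [List.range_succ, List.map_append, List.foldl_append, ih]
    have h5 : PySem.List.pyRange 0 5 1 = [0, 1, 2, 3, 4] := by decide
    simp only [List.map_cons, List.map_nil, List.foldl_cons, List.foldl_nil, jstep, h5]
    simp only [PySem.List.pyGet?, PySem.List.pyIdx?]
    norm_num [S97sum, Hrow, Finset.sum_range_succ]
    exact ⟨rfl, rfl, rfl⟩

theorem pyget_hrow (N t : Nat) :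
    (PySem.List.pyGet? [Hrow 0 N, Hrow 1 N, Hrow 2 N, Hrow 3 N, Hrow 4 N] ((t : Int) % 5)).getD 0
      = Hrow ((t : Int) % 5) N := by
  have h5 : (t : Int) % 5 = ((t % 5 : Nat) : Int) := by push_cast; omega
  have hc : t % 5 = 0 ∨ t % 5 = 1 ∨ t % 5 = 2 ∨ t % 5 = 3 ∨ t % 5 = 4 := by omega
  rcases hc with h | h | h | h | h <;>
    rw [h5, h] <;> simp [PySem.List.pyGet?, PySem.List.pyIdx?]

theorem tri (G : Nat → Int) (R : Nat) :
    ∑ r ∈ Finset.range R, ∑ t ∈ Finset.range (r + 1), G t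
      = ∑ t ∈ Finset.range R, ((R : Int) - (t : Int)) * G t := by
  induction R with
  | zero => simp
  | succ R ih =>
    rw [Finset.sum_range_succ, ih]
    have key : ∑ t ∈ Finset.range (R + 1), (((R + 1 : Nat) : Int) - (t : Int)) * G t
        = (∑ t ∈ Finset.range R, ((R : Int) - (t : Int)) * G t)
          + ∑ t ∈ Finset.range (R + 1), G t := by
      have h2 : ∀ t ∈ Finset.range (R + 1), (((R + 1 : Nat) : Int) - (t : Int)) * G t
          = ((R : Int) - (t : Int)) * G t + G t := fun t _ => by push_cast; ring
      rw [Finset.sum_congr rfl h2, Finset.sum_add_distrib,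
        Finset.sum_range_succ (fun t => ((R : Int) - (t : Int)) * G t) R]
      ring
    rw [key]

theorem Psum_eq (N R : Nat) :
    Psum N R = (R : Int) * S97sum N
      + ∑ t ∈ Finset.range R, ((R : Int) - (t : Int)) * Hrow ((t : Int) % 5) N := by
  have hXsum : ∀ m : Nat, (XsL N m).sum
      = S97sum N + ∑ t ∈ Finset.range m, Hrow (t : Int) N := by
    intro m
    have : (XsL N m).sum = ∑ j ∈ Finset.range N,
        ((j : Int) % 97 + ∑ t ∈ Finset.range m, ((j : Int) + (t : Int)) % 5) := rfl
    rw [this, Finset.sum_add_distrib, Finset.sum_comm]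
    rfl
  unfold Psum
  rw [Finset.sum_congr rfl (fun r _ => hXsum (r + 1)), Finset.sum_add_distrib,
    Finset.sum_const, Finset.card_range, tri]
  have hmod : ∀ t ∈ Finset.range R, ((R : Int) - (t : Int)) * Hrow ((t : Int)) N
      = ((R : Int) - (t : Int)) * Hrow ((t : Int) % 5) N := by
    intro t _
    have : Hrow ((t : Int)) N = Hrow ((t : Int) % 5) N :=
      Finset.sum_congr rfl (fun j _ => by omega)
    rw [this]
  rw [Finset.sum_congr rfl hmod]
  simp

theorem work_alt_eq_canon (size rounds : Int) :
    work_alt size rounds = canon (Psum size.toNat rounds.toNat) := by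
  unfold work_alt
  have hn : (if 0 < size then size else 0) = ((size.toNat : Nat) : Int) := by
    split_ifs <;> omega
  have hr : (if 0 < rounds then rounds else 0) = ((rounds.toNat : Nat) : Int) := by
    split_ifs <;> omega
  simp only [hn, hr, PySem.List.pyRange_zero_natCast]
  rw [bstate size.toNat]
  rw [PySem.List.foldl_add _ (fun t => (((rounds.toNat : Nat) : Int) - t) *
    (PySem.List.pyGet? [Hrow 0 size.toNat, Hrow 1 size.toNat, Hrow 2 size.toNat,
      Hrow 3 size.toNat, Hrow 4 size.toNat] (t % 5)).getD 0)]
  rw [List.map_map]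
  have hsum : ((List.range rounds.toNat).map ((fun t => (((rounds.toNat : Nat) : Int) - t) *
      (PySem.List.pyGet? [Hrow 0 size.toNat, Hrow 1 size.toNat, Hrow 2 size.toNat,
        Hrow 3 size.toNat, Hrow 4 size.toNat] (t % 5)).getD 0) ∘ (fun k : Nat => (k : Int)))).sum
      = ∑ t ∈ Finset.range rounds.toNat,
        (((rounds.toNat : Nat) : Int) - (t : Int)) * Hrow ((t : Int) % 5) size.toNat := by
    have : ∀ t : Nat, ((fun t => (((rounds.toNat : Nat) : Int) - t) *
        (PySem.List.pyGet? [Hrow 0 size.toNat, Hrow 1 size.toNat, Hrow 2 size.toNat,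
          Hrow 3 size.toNat, Hrow 4 size.toNat] (t % 5)).getD 0) ∘ (fun k : Nat => (k : Int))) t
        = (((rounds.toNat : Nat) : Int) - (t : Int)) * Hrow ((t : Int) % 5) size.toNat := by
      intro t
      simp only [Function.comp_apply]
      rw [pyget_hrow size.toNat t]
    rw [List.map_congr_left (fun t _ => this t)]
    rfl
  rw [hsum, ← Psum_eq size.toNat rounds.toNat]
  rfl

-- ===== VERDICT (by name: the statement is the Claim_ definition above) =====
theorem work_spec : Claim_equal_work := by
  intro size rounds _
  unfold Spec_work
  rw [work_eq_canon, work_alt_eq_canon]
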